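-- pv_equiv track=rewrite | github.com/mengyijia49/llaisys | python/llaisys/chat/cli.py | _resolve_turn
-- ===== SOURCE A (Python) =====
-- from typing import Dict, List, Optional, Tuple
--
-- def _user_turns(messages: List[Dict[str, str]]) -> List[Tuple[int, int, Optional[int]]]:
--     turns: List[Tuple[int, int, Optional[int]]] = []
--     turn_no = 0
--     idx = 0
--     while idx < len(messages):
--         role = messages[idx]["role"]
--         if role == "system":
--             idx += 1
--             continue
--         if role != "user":
--             idx += 1
--             continue
--         turn_no += 1
--         assistant_idx = idx + 1 if idx + 1 < len(messages) and messages[idx + 1]["role"] == "assistant" else None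
--         turns.append((turn_no, idx, assistant_idx))
--         idx = idx + 2 if assistant_idx is not None else idx + 1
--     return turns
--
-- def _resolve_turn(messages: List[Dict[str, str]], ref: str) -> Optional[Tuple[int, int, Optional[int]]]:
--     turns = _user_turns(messages)
--     if not turns:
--         return None
--     ref = ref.strip().lower()
--     if not ref or ref == "last":
--         return turns[-1]
--     try:
--         wanted = int(ref)
--     except ValueError:
--         return None
--     for turn in turns:
--         if turn[0] == wanted:
--             return turn
--     return None
-- ===== SOURCE B (Python) =====
-- from typing import Dict, List, Optional, Tuple
--
-- def _pairs(messages: List[Dict[str, str]], i: int) -> List[Tuple[int, Optional[int]]]: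
--     # un-numbered (user_idx, assistant_idx) pairs, built by forward recursion
--     if i >= len(messages):
--         return []
--     if messages[i]["role"] != "user":
--         return _pairs(messages, i + 1)
--     a = i + 1 if i + 1 < len(messages) and messages[i + 1]["role"] == "assistant" else None
--     return [(i, a)] + _pairs(messages, (i + 2) if a is not None else i + 1)
--
-- def _resolve_turn(messages: List[Dict[str, str]], ref: str) -> Optional[Tuple[int, int, Optional[int]]]:
--     pairs = _pairs(messages, 0)
--     if not pairs:
--         return None
--     key = ref.strip().lower()
--     if not key or key == "last":
--         u, a = pairs[-1]
--         return (len(pairs), u, a)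
--     try:
--         wanted = int(key)
--     except ValueError:
--         return None
--     if 1 <= wanted <= len(pairs):
--         u, a = pairs[wanted - 1]
--         return (wanted, u, a)
--     return None
-- ===== Notes on version B (the rewrite author's own statement) =====
-- stated objective: alternative
-- what changed: B collects plain (user_idx, assistant_idx) pairs by forward recursion without a turn counter and replaces A's linear scan over numbered turns with direct indexing pairs[wanted-1] guarded by 1 <= wanted <= len(pairs), exploiting that turn numbers are assigned 1,2,3,... sequentially.
import Mathlib
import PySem

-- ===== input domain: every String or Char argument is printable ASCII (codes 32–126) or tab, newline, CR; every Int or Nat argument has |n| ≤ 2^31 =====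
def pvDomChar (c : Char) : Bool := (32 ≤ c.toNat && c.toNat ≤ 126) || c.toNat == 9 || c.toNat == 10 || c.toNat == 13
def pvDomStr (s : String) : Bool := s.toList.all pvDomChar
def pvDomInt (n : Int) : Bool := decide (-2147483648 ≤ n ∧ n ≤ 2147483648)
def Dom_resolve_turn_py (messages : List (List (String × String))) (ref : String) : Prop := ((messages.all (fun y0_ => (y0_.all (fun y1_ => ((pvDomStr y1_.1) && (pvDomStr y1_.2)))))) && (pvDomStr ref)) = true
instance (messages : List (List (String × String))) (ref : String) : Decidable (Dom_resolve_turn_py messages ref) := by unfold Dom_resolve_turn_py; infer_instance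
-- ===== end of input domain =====

-- B drops the running turn counter and the linear scan: it collects un-numbered
-- (user, assistant) index pairs by forward recursion and answers a numeric reference
-- by direct indexing pairs[wanted-1]; objective: alternative (constant-factor lookup).

-- m["role"]: first-match lookup in the association list; total stand-in for Python's
-- KeyError (a message without a "role" key is excluded by Pre_resolve_turn_py).
def pvRole (m : List (String × String)) : String := (m.lookup "role").getD ""

-- ===== PORT A =====
-- _user_turns: the while loop as recursion over idx with the same state (turns, turn_no, idx)
def uturnsA (msgs : List (List (String × String))) (turns : List (Int × Int × Option Int))
    (turn_no : Int) (idx : Nat) : List (Int × Int × Option Int) :=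
  if h : idx < msgs.length then
    let role := pvRole msgs[idx]
    if role = "system" then uturnsA msgs turns turn_no (idx + 1)
    else if role ≠ "user" then uturnsA msgs turns turn_no (idx + 1)
    else
      let turn_no' := turn_no + 1
      let aIdx : Option Int :=
        if h2 : idx + 1 < msgs.length then
          if pvRole msgs[idx + 1] = "assistant" then some ((idx : Int) + 1) else none
        else none
      uturnsA msgs (turns ++ [(turn_no', (idx : Int), aIdx)]) turn_no'
        (if aIdx.isSome then idx + 2 else idx + 1)
  else turns
termination_by msgs.length - idx
decreasing_by all_goals (repeat' split) <;> omega

-- the 'for turn in turns: if turn[0] == wanted: return turn' scan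
def findTurnA : List (Int × Int × Option Int) → Int → Option (Int × Int × Option Int)
  | [], _ => none
  | t :: ts, w => if t.1 = w then some t else findTurnA ts w

def resolve_turn_py (messages : List (List (String × String))) (ref : String) : Option (Int × Int × Option Int) :=
  let turns := uturnsA messages [] 0 0
  if turns = [] then none
  else
    let r := PySem.Str.lower (PySem.Str.strip ref)
    if r = "" ∨ r = "last" then PySem.List.pyGet? turns (-1)
    else
      match PySem.Int.ofStr? r with
      | none => none
      | some wanted => findTurnA turns wanted

-- ===== PORT B =====
-- _pairs: forward recursion collecting un-numbered (user_idx, assistant_idx) pairs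
def pairsB (msgs : List (List (String × String))) (i : Nat) : List (Int × Option Int) :=
  if h : i < msgs.length then
    if pvRole msgs[i] ≠ "user" then pairsB msgs (i + 1)
    else
      let a : Option Int :=
        if h2 : i + 1 < msgs.length then
          if pvRole msgs[i + 1] = "assistant" then some ((i : Int) + 1) else none
        else none
      [((i : Int), a)] ++ pairsB msgs (if a.isSome then i + 2 else i + 1)
  else []
termination_by msgs.length - i
decreasing_by all_goals (repeat' split) <;> omega

def resolve_turn_py_alt (messages : List (List (String × String))) (ref : String) : Option (Int × Int × Option Int) :=
  let ps := pairsB messages 0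
  if ps = [] then none
  else
    let key := PySem.Str.lower (PySem.Str.strip ref)
    if key = "" ∨ key = "last" then
      match PySem.List.pyGet? ps (-1) with
      | some (u, a) => some ((ps.length : Int), u, a)
      | none => none
    else
      match PySem.Int.ofStr? key with
      | none => none
      | some w =>
        if 1 ≤ w ∧ w ≤ (ps.length : Int) then
          match PySem.List.pyGet? ps (w - 1) with
          | some (u, a) => some (w, u, a)
          | none => none
        else none

-- ===== PRECONDITION & SPEC =====
-- Pre_ excludes exactly the inputs where Python A raises KeyError: a message dict without a "role" key.
def Pre_resolve_turn_py (messages : List (List (String × String))) (ref : String) : Prop :=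
  ∀ m ∈ messages, (m.lookup "role").isSome = true
instance (messages : List (List (String × String))) (ref : String) : Decidable (Pre_resolve_turn_py messages ref) := by unfold Pre_resolve_turn_py; infer_instance
def pvWitness_resolve_turn_py : (List (List (String × String))) × String := ([[("role", "user")]], "last")

def Spec_resolve_turn_py (messages : List (List (String × String))) (ref : String) (out : Option (Int × Int × Option Int)) : Prop := out = resolve_turn_py_alt messages ref
instance (messages : List (List (String × String))) (ref : String) (out : Option (Int × Int × Option Int)) : Decidable (Spec_resolve_turn_py messages ref out) := by unfold Spec_resolve_turn_py; infer_instance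

-- ===== CLAIM (what is proved, stated in full; the proofs are below) =====
def Claim_equal_resolve_turn_py : Prop := ∀ (messages : List (List (String × String))) (ref : String), Dom_resolve_turn_py messages ref → Pre_resolve_turn_py messages ref → Spec_resolve_turn_py messages ref (resolve_turn_py messages ref)

-- ===== LEMMAS AND PROOFS =====

-- numbering a pair list k+1, k+2, … (A's turn counter, recovered from B's plain pairs)
def numberP (k : Int) : List (Int × Option Int) → List (Int × Int × Option Int)
  | [] => []
  | (u, a) :: rest => (k + 1, u, a) :: numberP (k + 1) rest

theorem uturnsA_eq_numberP (msgs : List (List (String × String)))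
    (turns : List (Int × Int × Option Int)) (t : Int) (idx : Nat) :
    uturnsA msgs turns t idx = turns ++ numberP t (pairsB msgs idx) := by
  induction turns, t, idx using uturnsA.induct msgs with
  | case1 turns t idx h role hsys ih =>
    have hs : pvRole msgs[idx] = "system" := hsys
    have hnu : pvRole msgs[idx] ≠ "user" := by rw [hs]; decide
    rw [uturnsA, pairsB]
    simp [h, hs, ih]
  | case2 turns t idx h role hsys hnu ih =>
    have hs : pvRole msgs[idx] ≠ "system" := hsys
    have hnu' : pvRole msgs[idx] ≠ "user" := by simpa using hnu
    rw [uturnsA, pairsB]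
    simp [h, hs, hnu', ih]
  | case3 turns t idx h role hsys hnu tn aIdx ih =>
    have hs : pvRole msgs[idx] ≠ "system" := hsys
    have hu : pvRole msgs[idx] = "user" := by
      by_contra hc
      exact hnu (by simpa using hc)
    rw [uturnsA, pairsB]
    simp [h, hu, numberP]
    rw [List.append_assoc, List.singleton_append] at ih
    exact ih
  | case4 turns t idx h =>
    rw [uturnsA, pairsB]
    simp [h, numberP]

theorem numberP_eq_nil (k : Int) (ps : List (Int × Option Int)) :
    numberP k ps = [] ↔ ps = [] := by
  cases ps with
  | nil => simp [numberP]
  | cons p rest => cases p; simp [numberP]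

theorem numberP_getLast? (k : Int) (ps : List (Int × Option Int)) :
    (numberP k ps).getLast? = ps.getLast?.map (fun p => (k + ps.length, p.1, p.2)) := by
  induction ps generalizing k with
  | nil => simp [numberP]
  | cons p rest ih =>
    cases p with
    | mk u a =>
      cases rest with
      | nil => simp [numberP]
      | cons q rest' =>
        have h1 : numberP k ((u, a) :: q :: rest') = (k + 1, u, a) :: numberP (k + 1) (q :: rest') := by
          simp [numberP]
        have h2 : numberP (k + 1) (q :: rest') ≠ [] := by
          cases q; simp [numberP]
        have h3 : ∀ (x : Int × Int × Option Int) (l : List (Int × Int × Option Int)), l ≠ [] → (x :: l).getLast? = l.getLast? := by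
          intro x l hl
          cases l with
          | nil => simp at hl
          | cons b l' => exact List.getLast?_cons_cons ..
        rw [h1, h3 _ _ h2, ih]
        rw [List.getLast?_cons_cons]
        have : k + 1 + ((rest'.length + 1 : Nat) : Int) = k + ((rest'.length + 1 + 1 : Nat) : Int) := by push_cast; ring
        simp only [List.length_cons, this]

theorem findTurnA_numberP (ps : List (Int × Option Int)) (k w : Int) :
    findTurnA (numberP k ps) w =
      if k < w ∧ w ≤ k + ps.length then
        match PySem.List.pyGet? ps (w - k - 1) with
        | some (u, a) => some (w, u, a)
        | none => none
      else none := by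
  induction ps generalizing k with
  | nil => simp [numberP, findTurnA]
  | cons p rest ih =>
    cases p with
    | mk u a =>
      rw [show numberP k ((u, a) :: rest) = (k + 1, u, a) :: numberP (k + 1) rest from rfl]
      rw [findTurnA]
      by_cases hw : k + 1 = w
      · subst hw
        simp
      · rw [if_neg (by simpa using hw), ih]
        by_cases hc : k + 1 < w ∧ w ≤ k + 1 + rest.length
        · rw [if_pos hc, if_pos (by simp; omega)]
          have hge : 0 ≤ w - k - 2 := by omega
          have e1 : PySem.List.pyGet? ((u, a) :: rest) (w - k - 1) = PySem.List.pyGet? rest (w - k - 2) := by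
            rw [PySem.List.pyGet?_of_nonneg _ (by omega : (0:Int) ≤ w - k - 1), PySem.List.pyGet?_of_nonneg _ hge]
            have : (w - k - 1).toNat = (w - k - 2).toNat + 1 := by omega
            rw [this, List.getElem?_cons_succ]
          rw [e1]
          have : w - (k + 1) - 1 = w - k - 2 := by ring
          rw [this]
        · rw [if_neg hc, if_neg (by simp at hc ⊢; omega)]

-- ===== VERDICT (by name: the statement is the Claim_ definition above) =====
theorem resolve_turn_py_spec : Claim_equal_resolve_turn_py := by
  intro messages ref _ _
  unfold Spec_resolve_turn_py
  simp only [resolve_turn_py, resolve_turn_py_alt]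
  have hT : uturnsA messages [] 0 0 = numberP 0 (pairsB messages 0) := by
    simpa using uturnsA_eq_numberP messages [] 0 0
  rw [hT]
  by_cases hnil : pairsB messages 0 = []
  · simp [hnil, numberP]
  · have hne : numberP 0 (pairsB messages 0) ≠ [] := by
      rw [ne_eq, numberP_eq_nil]; exact hnil
    rw [if_neg hne, if_neg hnil]
    by_cases hr : PySem.Str.lower (PySem.Str.strip ref) = "" ∨ PySem.Str.lower (PySem.Str.strip ref) = "last"
    · rw [if_pos hr, if_pos hr]
      rw [PySem.List.pyGet?_neg_one, PySem.List.pyGet?_neg_one, numberP_getLast?]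
      cases hL : (pairsB messages 0).getLast? with
      | none => simp
      | some p => cases p; simp
    · rw [if_neg hr, if_neg hr]
      cases hof : PySem.Int.ofStr? (PySem.Str.lower (PySem.Str.strip ref)) with
      | none => rfl
      | some w =>
        dsimp only
        rw [findTurnA_numberP]
        by_cases hcnd : 0 < w ∧ w ≤ ((pairsB messages 0).length : Int)
        · rw [if_pos (by omega : 0 < w ∧ w ≤ 0 + ((pairsB messages 0).length : Int)),
              if_pos (by omega : 1 ≤ w ∧ w ≤ ((pairsB messages 0).length : Int))]
          have : w - 0 - 1 = w - 1 := by ring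
          rw [this]
        · rw [if_neg (by omega : ¬(0 < w ∧ w ≤ 0 + ((pairsB messages 0).length : Int))),
              if_neg (by omega : ¬(1 ≤ w ∧ w ≤ ((pairsB messages 0).length : Int)))]
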